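-- pv_equiv track=rewrite | github.com/dachuanwud/coincock | program/xbx_stock_2021_part3/财务数据选股策略/program/Function_fin.py | mark_old_report
-- ===== SOURCE A (Python) =====
-- def mark_old_report(date_list):
--     """
--     标记当前研报期是否为废弃研报。
--     例如，已经发布1季度报，又更新了去年的年报，则去年的年报就是废弃报告
--     :param date_list:
--     :param x:最近N期的财报季度
--     :return:1表示为旧研报，nan表示非旧研报
--     """
--     res = []
--     for index, date in enumerate(date_list):
--         flag = 0  # 初始化返回结果，0表示为非废弃报告
--         for i in sorted(range(index), reverse=True):
--             # 如果之前已经有比now更加新的财报了，将now标记为1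
--             if date_list[i] > date:
--                 flag = 1
--         res.append(flag)
--     return res
-- ===== SOURCE B (Python) =====
-- def mark_old_report(date_list):
--     # Single pass: an entry is stale (1) iff the running maximum of the
--     # preceding entries is strictly larger than it.
--     res = []
--     mx = None
--     for d in date_list:
--         res.append(1 if (mx is not None and mx > d) else 0)
--         if mx is None or d > mx:
--             mx = d
--     return res
-- ===== Notes on version B (the rewrite author's own statement) =====
-- stated objective: faster
-- what changed: Replaced the per-index rescan of all earlier entries (nested loop with a needless reverse-sorted range) by a single left-to-right pass that keeps the running maximum of the prefix and emits 1 exactly when that maximum exceeds the current entry.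
import Mathlib
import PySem

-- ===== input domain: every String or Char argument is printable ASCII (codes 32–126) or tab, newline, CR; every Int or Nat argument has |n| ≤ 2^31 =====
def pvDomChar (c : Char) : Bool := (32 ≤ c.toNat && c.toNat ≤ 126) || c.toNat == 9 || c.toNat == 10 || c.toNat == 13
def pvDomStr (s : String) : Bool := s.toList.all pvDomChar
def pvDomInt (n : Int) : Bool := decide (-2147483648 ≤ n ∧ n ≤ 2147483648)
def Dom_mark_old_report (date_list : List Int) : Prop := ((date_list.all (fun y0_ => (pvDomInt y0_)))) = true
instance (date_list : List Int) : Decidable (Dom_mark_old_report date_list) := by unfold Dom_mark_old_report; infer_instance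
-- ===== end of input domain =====

-- B replaces A's per-index rescan of all earlier entries by one pass tracking the running maximum (objective: faster, O(n^2) → O(n)).

-- ===== PORT A =====
-- sorted(range(index), reverse=True) is the strictly increasing range reversed (exact);
-- date_list[i] with i ∈ range(index) is always in range, so pyGetD is exact (no IndexError possible).
def mark_old_report (date_list : List Int) : List Int :=
  (PySem.List.enumerate date_list).foldl
    (fun res p =>
      res ++ [ ((PySem.List.pyRange 0 p.1 1).reverse).foldl
                 (fun flag i => if PySem.List.pyGetD date_list i 0 > p.2 then (1 : Int) else flag) 0 ])
    []

-- ===== PORT B =====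
def altGo (mx : Option Int) : List Int → List Int
  | [] => []
  | d :: rest =>
      (match mx with
       | some m => if m > d then (1 : Int) else 0
       | none => 0) ::
      altGo (match mx with
             | none => some d
             | some m => if d > m then some d else some m) rest

def mark_old_report_alt (date_list : List Int) : List Int := altGo none date_list

-- ===== PRECONDITION & SPEC =====
def Spec_mark_old_report (date_list : List Int) (out : List Int) : Prop := out = mark_old_report_alt date_list
instance (date_list : List Int) (out : List Int) : Decidable (Spec_mark_old_report date_list out) := by unfold Spec_mark_old_report; infer_instance

-- ===== CLAIM (what is proved, stated in full; the proofs are below) =====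
def Claim_equal_mark_old_report : Prop := ∀ (date_list : List Int), Dom_mark_old_report date_list → Spec_mark_old_report date_list (mark_old_report date_list)

-- ===== LEMMAS AND PROOFS =====

-- "does the running maximum exceed e" — the Boolean B's state answers
def optGt (mx : Option Int) (e : Int) : Bool :=
  match mx with
  | some m => decide (m > e)
  | none => false

-- A's inner flag loop is an 'any' over the scanned indices
theorem foldl_flag (P : Int → Prop) [DecidablePred P] (l : List Int) (a : Int) :
    l.foldl (fun flag i => if P i then (1 : Int) else flag) a
      = if l.any (fun i => decide (P i)) then 1 else a := by
  induction l generalizing a with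
  | nil => simp
  | cons x xs ih =>
      simp only [List.foldl_cons, List.any_cons, ih]
      by_cases h : P x <;> simp [h]

-- scanning indices 0..n-1 of dl is scanning (dl.take n)
theorem any_range_getD (dl : List Int) (d : Int) :
    ∀ n : Nat, n ≤ dl.length →
      (PySem.List.pyRange 0 (n : Int) 1).any (fun i => decide (PySem.List.pyGetD dl i 0 > d))
        = (dl.take n).any (fun x => decide (x > d)) := by
  intro n
  induction n with
  | zero => simp
  | succ k ih =>
      intro hle
      have hk : k < dl.length := Nat.lt_of_succ_le hle
      have hsplit : PySem.List.pyRange 0 ((k + 1 : Nat) : Int) 1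
          = PySem.List.pyRange 0 (k : Int) 1 ++ [(k : Int)] := by
        have := PySem.List.pyRange_one_succ_right (a := 0) (b := (k : Int)) (Int.natCast_nonneg k)
        simpa using this
      have hget : PySem.List.pyGetD dl (k : Int) 0 = dl[k] := by
        rw [PySem.List.pyGetD_eq_getElem dl 0 (Int.natCast_nonneg k) (by simpa using hk)]
        simp
      rw [hsplit, List.any_append, ih (Nat.le_of_lt hk),
        List.take_add_one, List.any_append]
      simp [hget, hk]

-- the invariant step: the new running maximum answers queries about pref ++ [d]
theorem optGt_step (mx : Option Int) (pref : List Int) (d : Int)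
    (hInv : ∀ e : Int, optGt mx e = pref.any (fun x => decide (x > e))) :
    ∀ e : Int,
      optGt (match mx with
             | none => some d
             | some m => if d > m then some d else some m) e
        = (pref ++ [d]).any (fun x => decide (x > e)) := by
  intro e
  rw [List.any_append, ← hInv e]
  cases mx with
  | none => simp [optGt]
  | some m =>
      by_cases h : d > m <;> simp [optGt, h] <;> omega

-- main induction: processing the remaining entries agrees, given the invariant
theorem main_lemma (dl : List Int) :
    ∀ (rest pref : List Int) (mx : Option Int), dl = pref ++ rest →
      (∀ e : Int, optGt mx e = pref.any (fun x => decide (x > e))) →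
      (PySem.List.enumerate rest (pref.length : Int)).map
        (fun p => ((PySem.List.pyRange 0 p.1 1).reverse).foldl
            (fun flag i => if PySem.List.pyGetD dl i 0 > p.2 then (1 : Int) else flag) 0)
        = altGo mx rest := by
  intro rest
  induction rest with
  | nil => intro pref mx _ _; simp [PySem.List.enumerate_nil, altGo]
  | cons d rest ih =>
      intro pref mx hdl hInv
      have hlen : pref.length ≤ dl.length := by subst hdl; simp
      have htake : dl.take pref.length = pref := by
        subst hdl; simp
      have hhead : ((PySem.List.pyRange 0 (pref.length : Int) 1).reverse).foldl
          (fun flag i => if PySem.List.pyGetD dl i 0 > d then (1 : Int) else flag) 0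
          = if optGt mx d then 1 else 0 := by
        rw [foldl_flag, List.any_reverse, any_range_getD dl d pref.length hlen, htake, ← hInv d]
      have hcast : (pref.length : Int) + 1 = ((pref ++ [d]).length : Int) := by simp
      rw [PySem.List.enumerate_cons, List.map_cons, hcast,
        ih (pref ++ [d]) _ (by simpa using hdl) (optGt_step mx pref d hInv)]
      cases mx with
      | none => simp only [altGo]; rw [hhead]; simp [optGt]
      | some m =>
          simp only [altGo]; rw [hhead]
          by_cases h : m > d <;> simp [optGt, h]

-- ===== VERDICT (by name: the statement is the Claim_ definition above) =====
theorem mark_old_report_spec : Claim_equal_mark_old_report := by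
  intro dl _
  show _ = _
  rw [mark_old_report, PySem.List.foldl_append_singleton_eq_map, List.nil_append]
  exact main_lemma dl dl [] none rfl (fun e => by simp [optGt])
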